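-- pv_equiv track=rewrite | github.com/djimenez81/puzzles | src/py/sudoku.py | _verifyPartition
-- ===== SOURCE A (Python) =====
-- def _verifyPartition(partition, size):
--     # This method verifies if the partition variable actually corresponds to a
--     # partition.
--     if len(partition) == size:
--         if all([len(P) == size for P in partition]):
--             return all([all([any([[x,y] in P for P in partition])
--                     for x in range(size)]) for y in range(size)])
--         else:
--             return False
--     else:
--         return False
-- ===== SOURCE B (Python) =====
-- def _verifyPartition(partition, size):
--     # Count distinct in-range covered coordinates instead of scanning the
--     # partition once per required (x, y) pair.
--     if len(partition) != size:
--         return False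
--     if any(len(P) != size for P in partition):
--         return False
--     covered = {(e[0], e[1]) for P in partition for e in P
--                if len(e) == 2 and 0 <= e[0] < size and 0 <= e[1] < size}
--     return len(covered) == size * size
-- ===== Notes on version B (the rewrite author's own statement) =====
-- stated objective: alternative
-- what changed: Replaces the per-pair search (for every (x,y) scan all blocks for membership) by one aggregating pass that collects the distinct in-range covered coordinates into a set and compares its cardinality with size*size.
import Mathlib
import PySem

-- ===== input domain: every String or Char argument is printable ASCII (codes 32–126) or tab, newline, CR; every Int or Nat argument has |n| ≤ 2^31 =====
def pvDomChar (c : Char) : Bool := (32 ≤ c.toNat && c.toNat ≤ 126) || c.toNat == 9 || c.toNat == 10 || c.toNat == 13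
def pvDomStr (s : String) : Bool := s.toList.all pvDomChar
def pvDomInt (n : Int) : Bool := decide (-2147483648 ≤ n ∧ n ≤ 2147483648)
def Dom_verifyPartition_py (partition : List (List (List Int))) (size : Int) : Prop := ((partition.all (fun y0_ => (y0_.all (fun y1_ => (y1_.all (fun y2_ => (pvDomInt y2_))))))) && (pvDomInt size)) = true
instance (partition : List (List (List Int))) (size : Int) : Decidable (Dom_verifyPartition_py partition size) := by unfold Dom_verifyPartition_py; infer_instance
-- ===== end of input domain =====

-- B replaces A's per-pair membership search over the whole partition by a single pass
-- collecting the distinct in-range covered coordinates, comparing the count with size*size.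

-- ===== PORT A =====
def verifyPartition_py (partition : List (List (List Int))) (size : Int) : Bool :=
  if (partition.length : Int) = size then
    if partition.all (fun P => (P.length : Int) = size) then
      (PySem.List.pyRange 0 size 1).all (fun y =>
        (PySem.List.pyRange 0 size 1).all (fun x =>
          partition.any (fun P => decide ([x, y] ∈ P))))
    else false
  else false

-- ===== PORT B =====
-- the comprehension's filter-and-project step: Some (e0,e1) exactly when e is a
-- 2-element list whose entries lie in range(size)
def pvPairOf? (size : Int) (e : List Int) : Option (Int × Int) :=
  match e with
  | [a, b] => if 0 ≤ a ∧ a < size ∧ 0 ≤ b ∧ b < size then some (a, b) else none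
  | _ => none

def verifyPartition_py_alt (partition : List (List (List Int))) (size : Int) : Bool :=
  if (partition.length : Int) ≠ size then false
  else if partition.any (fun P => decide ((P.length : Int) ≠ size)) then false
  else
    let covered : PySem.Set (Int × Int) :=
      PySem.Set.ofList (partition.flatMap (fun P => P.filterMap (pvPairOf? size)))
    decide ((covered.length : Int) = size * size)

-- ===== PRECONDITION & SPEC =====
def Spec_verifyPartition_py (partition : List (List (List Int))) (size : Int) (out : Bool) : Prop := out = verifyPartition_py_alt partition size
instance (partition : List (List (List Int))) (size : Int) (out : Bool) : Decidable (Spec_verifyPartition_py partition size out) := by unfold Spec_verifyPartition_py; infer_instance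

-- ===== CLAIM (what is proved, stated in full; the proofs are below) =====
def Claim_equal_verifyPartition_py : Prop := ∀ (partition : List (List (List Int))) (size : Int), Dom_verifyPartition_py partition size → Spec_verifyPartition_py partition size (verifyPartition_py partition size)

-- ===== LEMMAS AND PROOFS =====

theorem pvPairOf?_eq_some (size : Int) (e : List Int) (a b : Int) :
    pvPairOf? size e = some (a, b) ↔
      e = [a, b] ∧ 0 ≤ a ∧ a < size ∧ 0 ≤ b ∧ b < size := by
  rcases e with _ | ⟨a', _ | ⟨b', _ | ⟨c', t⟩⟩⟩ <;> simp [pvPairOf?]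
  constructor
  · rintro ⟨hc, rfl, rfl⟩
    exact ⟨⟨rfl, rfl⟩, hc⟩
  · rintro ⟨⟨rfl, rfl⟩, hc⟩
    exact ⟨hc, rfl, rfl⟩

-- the grid of required coordinates
def pvBox (n : Nat) : List (Int × Int) :=
  ((List.range n).map (fun k : Nat => (k : Int))) ×ˢ ((List.range n).map (fun k : Nat => (k : Int)))

theorem pvBox_mem (n : Nat) (p : Int × Int) :
    p ∈ pvBox n ↔ 0 ≤ p.1 ∧ p.1 < n ∧ 0 ≤ p.2 ∧ p.2 < n := by
  obtain ⟨a, b⟩ := p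
  rw [pvBox, List.mem_product]
  simp only [List.mem_map, List.mem_range]
  constructor
  · rintro ⟨⟨x, hx, rfl⟩, ⟨y, hy, rfl⟩⟩
    refine ⟨by omega, by omega, by omega, by omega⟩
  · rintro ⟨h1, h2, h3, h4⟩
    exact ⟨⟨a.toNat, by omega, by omega⟩, ⟨b.toNat, by omega, by omega⟩⟩

theorem pvBox_nodup (n : Nat) : (pvBox n).Nodup := by
  have h : ((List.range n).map (fun k : Nat => (k : Int))).Nodup :=
    List.Nodup.map (fun a b hab => by omega) List.nodup_range
  exact List.Nodup.product h h

theorem pvBox_length (n : Nat) : (pvBox n).length = n * n := by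
  simp [pvBox, List.length_product]

theorem pv_mem_covered (partition : List (List (List Int))) (size : Int) (a b : Int) :
    (a, b) ∈ PySem.Set.ofList (partition.flatMap (fun P => P.filterMap (pvPairOf? size))) ↔
      (∃ P ∈ partition, [a, b] ∈ P) ∧ 0 ≤ a ∧ a < size ∧ 0 ≤ b ∧ b < size := by
  simp only [PySem.Set.mem_ofList, List.mem_flatMap, List.mem_filterMap, pvPairOf?_eq_some]
  aesop

theorem pv_count_iff (partition : List (List (List Int))) (n : Nat) :
    ((PySem.Set.ofList (partition.flatMap (fun P => P.filterMap (pvPairOf? (n : Int))))).length = n * n ↔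
      ∀ p ∈ pvBox n, p ∈ PySem.Set.ofList (partition.flatMap (fun P => P.filterMap (pvPairOf? (n : Int))))) := by
  set S := PySem.Set.ofList (partition.flatMap (fun P => P.filterMap (pvPairOf? (n : Int)))) with hS
  have hnd : S.Nodup := PySem.Set.nodup_ofList _
  have hsub : S ⊆ pvBox n := by
    intro p hp
    obtain ⟨a, b⟩ := p
    rw [pvBox_mem]
    have h := (pv_mem_covered partition (n : Int) a b).mp hp
    exact ⟨h.2.1, by exact_mod_cast h.2.2.1, h.2.2.2.1, by exact_mod_cast h.2.2.2.2⟩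
  have hsp : List.Subperm S (pvBox n) := List.subperm_of_subset hnd hsub
  constructor
  · intro hlen p hp
    have hperm : S.Perm (pvBox n) := hsp.perm_of_length_le (by rw [pvBox_length, hlen])
    exact hperm.mem_iff.mpr hp
  · intro hmem
    have hsp2 : List.Subperm (pvBox n) S := List.subperm_of_subset (pvBox_nodup n) hmem
    have h := le_antisymm hsp.length_le hsp2.length_le
    rw [h, pvBox_length]

-- ===== VERDICT (by name: the statement is the Claim_ definition above) =====
theorem verifyPartition_py_spec : Claim_equal_verifyPartition_py := by
  intro partition size _
  unfold Spec_verifyPartition_py verifyPartition_py verifyPartition_py_alt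
  by_cases h1 : (partition.length : Int) = size
  · subst h1
    simp only [ne_eq, not_true_eq_false, if_false]
    by_cases h2 : ∀ P ∈ partition, (P.length : Int) = (partition.length : Int)
    · have hA : partition.all (fun P => decide ((P.length : Int) = (partition.length : Int))) = true := by
        simp only [List.all_eq_true, decide_eq_true_eq]; exact h2
      have hB : partition.any (fun P => decide ¬((P.length : Int) = (partition.length : Int))) = false := by
        simp only [List.any_eq_false, decide_eq_true_eq, not_not]; exact h2
      simp only [hA, hB, if_true, if_false, Bool.false_eq_true]
      rw [Bool.eq_iff_iff]
      simp only [List.all_eq_true, List.any_eq_true, decide_eq_true_eq,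
        PySem.List.mem_pyRange_one]
      rw [show ((partition.length : Int) * (partition.length : Int)) =
            ((partition.length * partition.length : Nat) : Int) by push_cast; ring]
      rw [Int.natCast_inj]
      rw [pv_count_iff partition partition.length]
      constructor
      · intro hall p hp
        obtain ⟨a, b⟩ := p
        rw [pvBox_mem] at hp
        exact (pv_mem_covered partition _ a b).mpr
          ⟨by
            obtain ⟨P, hP, hmem⟩ := hall b ⟨hp.2.2.1, by exact_mod_cast hp.2.2.2⟩ a
              ⟨hp.1, by exact_mod_cast hp.2.1⟩
            exact ⟨P, hP, hmem⟩,
           hp.1, by exact_mod_cast hp.2.1, hp.2.2.1, by exact_mod_cast hp.2.2.2⟩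
      · intro hbox y hy x hx
        have hp : (x, y) ∈ pvBox partition.length := by
          rw [pvBox_mem]
          exact ⟨hx.1, by exact_mod_cast hx.2, hy.1, by exact_mod_cast hy.2⟩
        exact ((pv_mem_covered partition _ x y).mp (hbox (x, y) hp)).1
    · have hA : partition.all (fun P => decide ((P.length : Int) = (partition.length : Int))) = false := by
        simp only [List.all_eq_false]
        push Not at h2
        obtain ⟨P, hP, hne⟩ := h2
        exact ⟨P, hP, by simpa using hne⟩
      have hB : partition.any (fun P => decide ¬((P.length : Int) = (partition.length : Int))) = true := by
        push Not at h2
        obtain ⟨P, hP, hne⟩ := h2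
        simp only [List.any_eq_true, decide_eq_true_eq]
        exact ⟨P, hP, hne⟩
      rw [hA, hB]
      simp
  · simp [h1]
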